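-- pv_equiv track=rewrite | github.com/enjoyblacktea/test | backend/scripts/seed_character_metadata.py | parse_zhuyin
-- ===== SOURCE A (Python) =====
-- INITIALS = set("ㄅㄆㄇㄈㄉㄊㄋㄌㄍㄎㄏㄐㄑㄒㄓㄔㄕㄖㄗㄘㄙ")
--
-- TONE_MAP = {"ˉ": 1, "ˊ": 2, "ˇ": 3, "ˋ": 4, "˙": 5}
--
-- KEY_TO_ZHUYIN = {
--     "1": "ㄅ", "q": "ㄆ", "a": "ㄇ", "z": "ㄈ",
--     "2": "ㄉ", "w": "ㄊ", "s": "ㄋ", "x": "ㄌ",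
--     "e": "ㄍ", "d": "ㄎ", "c": "ㄏ",
--     "r": "ㄐ", "f": "ㄑ", "v": "ㄒ",
--     "5": "ㄓ", "t": "ㄔ", "g": "ㄕ", "b": "ㄖ",
--     "y": "ㄗ", "h": "ㄘ", "n": "ㄙ",
--     "u": "ㄧ", "j": "ㄨ", "m": "ㄩ",
--     "8": "ㄚ", "i": "ㄛ", "k": "ㄜ", ",": "ㄝ",
--     "9": "ㄞ", "o": "ㄟ", "l": "ㄠ", ".": "ㄡ",
--     "0": "ㄢ", "p": "ㄣ", ";": "ㄤ", "/": "ㄥ",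
--     "-": "ㄦ",
--     " ": "ˉ",
--     "6": "ˊ", "3": "ˇ", "4": "ˋ", "7": "˙",
-- }
--
-- def parse_zhuyin(input_code: str) -> tuple[str | None, str | None, int | None]:
--     """從 input_code 解析 (initial, final, tone)。
--
--     input_code 格式：鍵盤按鍵以空格分隔，尾部空格代表一聲（ˉ）。
--     回傳 (initial, final, tone)，initial 可為 None（純韻母字）。
--     """
--     parts = input_code.split(" ")
--     keys = [k for k in parts if k]
--     if input_code.rstrip("\n\r\t").endswith(" "):
--         keys.append(" ")
--
--     zhuyin = [KEY_TO_ZHUYIN.get(k) for k in keys]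
--
--     # 過濾 None（未知按鍵）
--     if None in zhuyin:
--         return None, None, None
--
--     initial = None
--     final_parts = []
--     tone = 1  # 預設一聲
--
--     for sym in zhuyin:
--         if sym in TONE_MAP:
--             tone = TONE_MAP[sym]
--         elif sym in INITIALS and initial is None and not final_parts:
--             initial = sym
--         else:
--             final_parts.append(sym)
--
--     final = "".join(final_parts) if final_parts else None
--
--     return initial, final, tone
-- ===== SOURCE B (Python) =====
-- # Parallel-string tables instead of dict/set lookups: KEYS[i] maps to ZHUYIN[i];
-- # tone index in TONES gives the tone number; the first 21 zhuyin chars are the initials.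
-- KEYS   = "1qaz2wsxedcrfv5tgbyhnujm8ik,9ol.0p;/- 6347"
-- ZHUYIN = "\u3105\u3106\u3107\u3108\u3109\u310a\u310b\u310c\u310d\u310e\u310f\u3110\u3111\u3112\u3113\u3114\u3115\u3116\u3117\u3118\u3119\u3127\u3128\u3129\u311a\u311b\u311c\u311d\u311e\u311f\u3120\u3121\u3122\u3123\u3124\u3125\u3126\u02c9\u02ca\u02c7\u02cb\u02d9"
-- TONES  = "\u02c9\u02ca\u02c7\u02cb\u02d9"
--
-- def parse_zhuyin(input_code: str) -> tuple:
--     keys = [k for k in input_code.split(" ") if k]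
--     # detect a trailing space (first tone) by scanning back past \n\r\t
--     i = len(input_code) - 1
--     while i >= 0 and input_code[i] in "\n\r\t":
--         i -= 1
--     if i >= 0 and input_code[i] == " ":
--         keys.append(" ")
--
--     syms = []
--     for k in keys:
--         j = KEYS.find(k) if len(k) == 1 else -1
--         if j < 0:
--             return None, None, None
--         syms.append(ZHUYIN[j])
--
--     tone = 1
--     for s in reversed(syms):
--         t = TONES.find(s)
--         if t >= 0:
--             tone = t + 1
--             break
--
--     rest = [s for s in syms if s not in TONES]
--     if rest and rest[0] in ZHUYIN[:21]:
--         return rest[0], "".join(rest[1:]) or None, tone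
--     return None, "".join(rest) or None, tone
-- ===== Notes on version B (the rewrite author's own statement) =====
-- stated objective: alternative
-- what changed: Replaced the dict/set tables and A's single stateful accumulator loop by two parallel lookup strings with index arithmetic (tone = index in TONES + 1, initials = first 21 zhuyin chars), an early-return mapping loop, a backward scan for the last tone symbol, and a leading-initial split of the non-tone symbols.
import Mathlib
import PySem

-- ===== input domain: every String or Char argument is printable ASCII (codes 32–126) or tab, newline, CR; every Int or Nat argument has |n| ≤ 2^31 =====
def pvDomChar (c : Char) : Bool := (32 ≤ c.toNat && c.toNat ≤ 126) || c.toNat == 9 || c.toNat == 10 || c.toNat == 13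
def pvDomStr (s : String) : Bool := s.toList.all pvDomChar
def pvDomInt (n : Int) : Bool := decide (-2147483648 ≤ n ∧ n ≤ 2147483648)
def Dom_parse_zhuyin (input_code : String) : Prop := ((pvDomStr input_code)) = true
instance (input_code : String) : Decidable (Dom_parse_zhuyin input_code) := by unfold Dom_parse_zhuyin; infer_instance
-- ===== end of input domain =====

-- B replaces A's dict/set tables and single stateful accumulator loop by two parallel
-- lookup strings with index arithmetic (tone = index in TONES + 1, initials = the first
-- 21 zhuyin chars), an early-return mapping loop, a backward scan for the last tone
-- symbol and a leading-initial split of the non-tone symbols; objective: alternative.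


-- ===== PORT A =====
def pvINITIALS : PySem.Set String := PySem.Set.ofList
  ["ㄅ","ㄆ","ㄇ","ㄈ","ㄉ","ㄊ","ㄋ","ㄌ","ㄍ","ㄎ","ㄏ","ㄐ","ㄑ","ㄒ","ㄓ","ㄔ","ㄕ","ㄖ","ㄗ","ㄘ","ㄙ"]
def pvTONE_MAP : PySem.Dict String Int :=
  PySem.Dict.mk [("ˉ", 1), ("ˊ", 2), ("ˇ", 3), ("ˋ", 4), ("˙", 5)]
def pvKEY_TO_ZHUYIN : PySem.Dict String String := PySem.Dict.mk
  [("1","ㄅ"),("q","ㄆ"),("a","ㄇ"),("z","ㄈ"),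
   ("2","ㄉ"),("w","ㄊ"),("s","ㄋ"),("x","ㄌ"),
   ("e","ㄍ"),("d","ㄎ"),("c","ㄏ"),
   ("r","ㄐ"),("f","ㄑ"),("v","ㄒ"),
   ("5","ㄓ"),("t","ㄔ"),("g","ㄕ"),("b","ㄖ"),
   ("y","ㄗ"),("h","ㄘ"),("n","ㄙ"),
   ("u","ㄧ"),("j","ㄨ"),("m","ㄩ"),
   ("8","ㄚ"),("i","ㄛ"),("k","ㄜ"),(",","ㄝ"),
   ("9","ㄞ"),("o","ㄟ"),("l","ㄠ"),(".","ㄡ"),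
   ("0","ㄢ"),("p","ㄣ"),(";","ㄤ"),("/","ㄥ"),
   ("-","ㄦ"),
   (" ","ˉ"),
   ("6","ˊ"),("3","ˇ"),("4","ˋ"),("7","˙")]

-- exact port of s.rstrip("\n\r\t"): drop trailing characters of that set
def pvRstrip3 (s : String) : List Char :=
  (s.toList.reverse.dropWhile (fun c => c ∈ ['\n', '\r', '\t'])).reverse

-- A's preamble: parts / keys / trailing-space key / mapped symbols
def pvZhuyinKeys (input_code : String) : List (Option String) :=
  let parts := (PySem.Str.split? input_code " ").getD []   -- sep " " ≠ "", so split? is always some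
  let keys := parts.filter (fun k => !(k == ""))
  let keys := if PySem.Chars.endswith (pvRstrip3 input_code) [' '] then keys ++ [" "] else keys
  keys.map (fun k => pvKEY_TO_ZHUYIN.get? k)

-- A's loop body; TONE_MAP[sym] is ported as getD sym 0 (only reached when contains sym)
def pvStepA (acc : Option String × List String × Int) (sym : String) :
    Option String × List String × Int :=
  let (initial, final_parts, tone) := acc
  if pvTONE_MAP.contains sym then (initial, final_parts, pvTONE_MAP.getD sym 0)
  else if pvINITIALS.contains sym && initial == none && final_parts == [] then
    (some sym, final_parts, tone)
  else (initial, final_parts ++ [sym], tone)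

def pvCoreA (syms : List String) : Option String × Option String × Option Int :=
  let st := syms.foldl pvStepA (none, [], 1)
  let final := if st.2.1 == [] then none else some (PySem.Str.join "" st.2.1)
  (st.1, final, some st.2.2)

def parse_zhuyin (input_code : String) : Option String × Option String × Option Int :=
  let zhuyin := pvZhuyinKeys input_code
  if zhuyin.contains none then (none, none, none)
  else pvCoreA zhuyin.reduceOption   -- no None present: the contained strings, in order

-- ===== PORT B =====
-- parallel lookup tables (str constants as char lists): pvKEYS[i] maps to pvZHUYIN[i]
def pvKEYS : List Char :=
  ['1','q','a','z','2','w','s','x','e','d','c','r','f','v','5','t','g','b','y','h','n',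
   'u','j','m','8','i','k',',','9','o','l','.','0','p',';','/','-',' ','6','3','4','7']
def pvZHUYIN : List Char :=
  ['ㄅ','ㄆ','ㄇ','ㄈ','ㄉ','ㄊ','ㄋ','ㄌ','ㄍ','ㄎ','ㄏ','ㄐ','ㄑ','ㄒ','ㄓ','ㄔ','ㄕ','ㄖ','ㄗ','ㄘ','ㄙ',
   'ㄧ','ㄨ','ㄩ','ㄚ','ㄛ','ㄜ','ㄝ','ㄞ','ㄟ','ㄠ','ㄡ','ㄢ','ㄣ','ㄤ','ㄥ','ㄦ','ˉ','ˊ','ˇ','ˋ','˙']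
def pvTONES : List Char := ['ˉ', 'ˊ', 'ˇ', 'ˋ', '˙']

-- the backward while loop: scan from the end past \n\r\t, then test for ' '
def pvTailAfterWsB : List Char → Bool
  | [] => false
  | c :: cs => if c == '\n' || c == '\r' || c == '\t' then pvTailAfterWsB cs else c == ' '

-- j = KEYS.find(k) if len(k) == 1 else -1; ZHUYIN[j] (a 1-char Python string = a Char)
def pvLookupB (k : String) : Option Char :=
  match k.toList with
  | [c] =>
    let j := PySem.Chars.find pvKEYS [c]
    if j < 0 then none else PySem.List.pyGet? pvZHUYIN j
  | _ => none

-- the mapping loop with its early `return None, None, None`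
def pvMapKeysB : List String → Option (List Char)
  | [] => some []
  | k :: ks =>
    match pvLookupB k with
    | none => none
    | some c => (pvMapKeysB ks).map (c :: ·)

-- `for s in reversed(syms): t = TONES.find(s); if t >= 0: tone = t + 1; break`
def pvToneRevB : List Char → Int
  | [] => 1
  | s :: ss =>
    let t := PySem.Chars.find pvTONES [s]
    if 0 ≤ t then t + 1 else pvToneRevB ss

def parse_zhuyin_alt (input_code : String) : Option String × Option String × Option Int :=
  let keys := ((PySem.Str.split? input_code " ").getD []).filter (fun k => !(k == ""))
  let keys := if pvTailAfterWsB input_code.toList.reverse then keys ++ [" "] else keys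
  match pvMapKeysB keys with
  | none => (none, none, none)
  | some syms =>
    let tone := pvToneRevB syms.reverse
    let rest := syms.filter (fun s => !(PySem.Chars.isIn [s] pvTONES))
    match rest with
    | [] => (none, none, some tone)
    | r :: rs =>
      if PySem.Chars.isIn [r] (PySem.List.slice pvZHUYIN none (some 21)) then
        (some (String.ofList [r]), if rs == [] then none else some (String.ofList rs), some tone)
      else (none, some (String.ofList (r :: rs)), some tone)

-- ===== PRECONDITION & SPEC =====
def Spec_parse_zhuyin (input_code : String) (out : Option String × Option String × Option Int) : Prop := out = parse_zhuyin_alt input_code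
instance (input_code : String) (out : Option String × Option String × Option Int) : Decidable (Spec_parse_zhuyin input_code out) := by unfold Spec_parse_zhuyin; infer_instance

-- ===== CLAIM =====
def Claim_equal_parse_zhuyin : Prop := ∀ (input_code : String), Dom_parse_zhuyin input_code → Spec_parse_zhuyin input_code (parse_zhuyin input_code)

-- ===== LEMMAS AND PROOFS =====

-- singleton-infix membership, as a Bool equation
lemma pv_isIn1 (l : List Char) (c : Char) :
    PySem.Chars.isIn [c] l = decide (c ∈ l) := by
  rw [Bool.eq_iff_iff, PySem.Chars.isIn_iff_infix]
  simp [List.singleton_infix_iff]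

-- the trailing-space tests agree
lemma pv_tail_eq_aux (l : List Char) :
    PySem.Chars.endswith ((l.dropWhile (fun c => c ∈ ['\n', '\r', '\t'])).reverse) [' ']
      = pvTailAfterWsB l := by
  induction l with
  | nil => decide
  | cons c cs ih =>
    by_cases hw : c ∈ ['\n', '\r', '\t']
    · have hb : (c == '\n' || c == '\r' || c == '\t') = true := by
        simp only [List.mem_cons, List.not_mem_nil, or_false] at hw
        rcases hw with h | h | h <;> simp [h]
      rw [List.dropWhile_cons_of_pos (by simpa using hw), ih]
      simp [pvTailAfterWsB, hb]
    · have hb : (c == '\n' || c == '\r' || c == '\t') = false := by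
        simp only [List.mem_cons, List.not_mem_nil, or_false, not_or] at hw
        simp [hw.1, hw.2.1, hw.2.2]
      rw [List.dropWhile_cons_of_neg (by simpa using hw)]
      have hend : PySem.Chars.endswith ((c :: cs).reverse) [' '] = (c == ' ') := by
        rw [Bool.eq_iff_iff, PySem.Chars.endswith_iff, beq_iff_eq]
        rw [show ([' '] : List Char) = [' '].reverse from rfl, List.reverse_suffix]
        simp [List.cons_prefix_cons, eq_comm]
      rw [hend]
      simp [pvTailAfterWsB, hb]

lemma pv_tail_eq (s : String) :
    PySem.Chars.endswith (pvRstrip3 s) [' '] = pvTailAfterWsB s.toList.reverse := by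
  unfold pvRstrip3
  exact pv_tail_eq_aux s.toList.reverse

-- dict lookup on a key actually present
lemma pv_lookup_keys (c : Char) (h : c ∈ pvKEYS) :
    pvKEY_TO_ZHUYIN.get? (String.ofList [c])
      = (pvLookupB (String.ofList [c])).map (fun c => String.ofList [c]) := by
  simp only [pvKEYS] at h
  fin_cases h <;> decide

-- dict lookup = parallel-string lookup (as a 1-char string)
lemma pv_lookup_eq (k : String) :
    pvKEY_TO_ZHUYIN.get? k = (pvLookupB k).map (fun c => String.ofList [c]) := by
  cases hl : k.toList with
  | nil =>
    obtain rfl : k = "" := by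
      have h2 := congrArg String.ofList hl
      rw [String.ofList_toList] at h2
      exact h2.trans (by rfl)
    decide
  | cons c cs =>
    cases cs with
    | nil =>
      obtain rfl : k = String.ofList [c] := by
        have h2 := congrArg String.ofList hl
        rwa [String.ofList_toList] at h2
      by_cases h : c ∈ pvKEYS
      · exact pv_lookup_keys c h
      · have hfind : PySem.Chars.find pvKEYS [c] = -1 := by
          rw [PySem.Chars.find_eq_neg_one_iff]
          simpa [List.singleton_infix_iff] using h
        have hB : pvLookupB (String.ofList [c]) = none := by
          simp [pvLookupB, String.toList_ofList, hfind]
        have hA : pvKEY_TO_ZHUYIN.get? (String.ofList [c]) = none := by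
          rw [PySem.Dict.get?_eq_none_iff_not_mem_keys,
            show pvKEY_TO_ZHUYIN.keys = pvKEYS.map (fun a => String.ofList [a]) from rfl]
          simpa [String.ofList_inj] using h
        rw [hA, hB]; rfl
    | cons d ds =>
      have hB : pvLookupB k = none := by
        simp only [pvLookupB, hl]
      have hA : pvKEY_TO_ZHUYIN.get? k = none := by
        rw [PySem.Dict.get?_eq_none_iff_not_mem_keys,
          show pvKEY_TO_ZHUYIN.keys = pvKEYS.map (fun a => String.ofList [a]) from rfl]
        intro hmem
        obtain ⟨a, _, ha⟩ := List.mem_map.mp hmem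
        have := congrArg String.toList ha
        rw [String.toList_ofList, hl] at this
        simp at this
      rw [hA, hB]; rfl

-- tone membership bridge
lemma pv_tone_mem (c : Char) :
    pvTONE_MAP.contains (String.ofList [c]) = PySem.Chars.isIn [c] pvTONES := by
  rw [pv_isIn1, PySem.Dict.contains_eq_decide_mem_keys,
    show pvTONE_MAP.keys = pvTONES.map (fun a => String.ofList [a]) from rfl]
  simp [String.ofList_inj]

-- tone value bridge
lemma pv_tone_val (c : Char) (h : c ∈ pvTONES) :
    pvTONE_MAP.getD (String.ofList [c]) 0 = PySem.Chars.find pvTONES [c] + 1 := by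
  fin_cases h <;> decide

-- initials membership bridge
lemma pv_initial_mem (c : Char) :
    pvINITIALS.contains (String.ofList [c])
      = PySem.Chars.isIn [c] (PySem.List.slice pvZHUYIN none (some 21)) := by
  rw [pv_isIn1,
    show PySem.List.slice pvZHUYIN none (some 21) = pvZHUYIN.take 21 from by decide]
  by_cases h : c ∈ pvZHUYIN.take 21
  · rw [decide_eq_true h]
    have h21 : c ∈ ['ㄅ','ㄆ','ㄇ','ㄈ','ㄉ','ㄊ','ㄋ','ㄌ','ㄍ','ㄎ','ㄏ','ㄐ','ㄑ','ㄒ','ㄓ','ㄔ','ㄕ','ㄖ','ㄗ','ㄘ','ㄙ'] := by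
      rwa [show pvZHUYIN.take 21
        = ['ㄅ','ㄆ','ㄇ','ㄈ','ㄉ','ㄊ','ㄋ','ㄌ','ㄍ','ㄎ','ㄏ','ㄐ','ㄑ','ㄒ','ㄓ','ㄔ','ㄕ','ㄖ','ㄗ','ㄘ','ㄙ'] from by decide] at h
    fin_cases h21 <;> decide
  · rw [decide_eq_false h, ← Bool.not_eq_true]
    intro hc
    have hmem : String.ofList [c] ∈ (pvZHUYIN.take 21).map (fun a => String.ofList [a]) := by
      have := hc
      rw [show pvINITIALS = (pvZHUYIN.take 21).map (fun a => String.ofList [a]) from by decide] at this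
      simpa [PySem.Set.contains] using this
    obtain ⟨a, ha, hEq⟩ := List.mem_map.mp hmem
    rw [String.ofList_inj] at hEq
    obtain rfl : a = c := by simpa using hEq
    exact h ha

-- the mapping stage: A's map-then-check = B's early-return loop
lemma pv_map_none (keys : List String) :
    ((keys.map (fun k => pvKEY_TO_ZHUYIN.get? k)).contains none = true) ↔ pvMapKeysB keys = none := by
  induction keys with
  | nil => simp [pvMapKeysB]
  | cons k ks ih =>
    rw [List.map_cons, pv_lookup_eq]
    cases hv : pvLookupB k with
    | none => simp [pvMapKeysB, hv]
    | some c =>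
      rw [show pvMapKeysB (k :: ks) = (pvMapKeysB ks).map (c :: ·) from by
        simp [pvMapKeysB, hv]]
      simp only [Option.map_some]
      have hhead : ((some (String.ofList [c]) :: ks.map (fun k => pvKEY_TO_ZHUYIN.get? k)).contains
          none = true) ↔ ((ks.map (fun k => pvKEY_TO_ZHUYIN.get? k)).contains none = true) := by
        simp
      rw [hhead, ih]
      cases hrec : pvMapKeysB ks <;> simp

lemma pv_map_some (keys : List String) (cs : List Char) (h : pvMapKeysB keys = some cs) :
    (keys.map (fun k => pvKEY_TO_ZHUYIN.get? k)).reduceOption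
      = cs.map (fun c => String.ofList [c]) := by
  induction keys generalizing cs with
  | nil =>
    simp only [pvMapKeysB] at h
    cases h; simp
  | cons k ks ih =>
    rw [List.map_cons, pv_lookup_eq]
    cases hv : pvLookupB k with
    | none => simp [pvMapKeysB, hv] at h
    | some c =>
      simp only [pvMapKeysB, hv] at h
      cases hrec : pvMapKeysB ks with
      | none => rw [hrec] at h; simp at h
      | some cs' =>
        rw [hrec] at h
        simp only [Option.map_some, Option.some.injEq] at h
        subst h
        simp [ih cs' hrec]

-- A's tone fold
def pvToneFold (t : Int) (l : List String) : Int :=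
  l.foldl (fun t s => if pvTONE_MAP.contains s then pvTONE_MAP.getD s 0 else t) t

lemma pvToneFold_eq_getLast (l : List String) (t : Int) :
    pvToneFold t l = match (l.filter (fun s => pvTONE_MAP.contains s)).getLast? with
      | some u => pvTONE_MAP.getD u 0
      | none => t := by
  induction l generalizing t with
  | nil => rfl
  | cons s l ih =>
    by_cases hc : pvTONE_MAP.contains s = true
    · have h1 : pvToneFold t (s :: l) = pvToneFold (pvTONE_MAP.getD s 0) l := by
        simp [pvToneFold, hc]
      rw [h1, ih, List.filter_cons_of_pos hc, List.getLast?_cons]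
      cases (l.filter (fun s => pvTONE_MAP.contains s)).getLast? <;> simp
    · have h1 : pvToneFold t (s :: l) = pvToneFold t l := by
        simp [pvToneFold, hc]
      rw [h1, ih, List.filter_cons_of_neg (by simpa using hc)]

lemma pvFoldA_blocked (l : List String) (ini : Option String) (fp : List String) (t : Int)
    (h : fp ≠ [] ∨ ini ≠ none) :
    l.foldl pvStepA (ini, fp, t) =
      (ini, fp ++ l.filter (fun s => !pvTONE_MAP.contains s), pvToneFold t l) := by
  induction l generalizing ini fp t with
  | nil => simp [pvToneFold]
  | cons s l ih =>
    by_cases hc : pvTONE_MAP.contains s = true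
    · rw [List.foldl_cons, show pvStepA (ini, fp, t) s = (ini, fp, pvTONE_MAP.getD s 0) from by
        simp [pvStepA, hc], ih _ _ _ h]
      simp [hc, pvToneFold]
    · have hcond : (pvINITIALS.contains s && ini == none && fp == []) = false := by
        rcases h with h | h
        · have hb : (fp == []) = false := by simpa using h
          simp [hb]
        · have hb : (ini == none) = false := by
            cases ini with
            | none => exact absurd rfl h
            | some v => rfl
          simp [hb]
      rw [List.foldl_cons, show pvStepA (ini, fp, t) s = (ini, fp ++ [s], t) from by
        simp only [pvStepA, hc, hcond]; rfl,
        ih _ _ _ (Or.inl (by simp))]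
      simp [hc, pvToneFold]

lemma pvFoldA_main (l : List String) (t : Int) :
    l.foldl pvStepA (none, [], t) =
      (match l.filter (fun s => !pvTONE_MAP.contains s) with
        | [] => ((none : Option String), ([] : List String), pvToneFold t l)
        | r :: rs =>
          if pvINITIALS.contains r then (some r, rs, pvToneFold t l)
          else (none, r :: rs, pvToneFold t l)) := by
  induction l generalizing t with
  | nil => rfl
  | cons s l ih =>
    by_cases hc : pvTONE_MAP.contains s = true
    · have htf : pvToneFold t (s :: l) = pvToneFold (pvTONE_MAP.getD s 0) l := by
        simp [pvToneFold, hc]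
      rw [List.foldl_cons, show pvStepA (none, [], t) s = (none, [], pvTONE_MAP.getD s 0) from by
        simp [pvStepA, hc], ih, List.filter_cons_of_neg (by simp [hc]), htf]
    · have htf : pvToneFold t (s :: l) = pvToneFold t l := by
        simp [pvToneFold, hc]
      have hfs : (s :: l).filter (fun s => !pvTONE_MAP.contains s) =
          s :: l.filter (fun s => !pvTONE_MAP.contains s) :=
        List.filter_cons_of_pos (by simp [hc])
      by_cases hi : s ∈ pvINITIALS
      · rw [List.foldl_cons, show pvStepA (none, [], t) s = (some s, [], t) from by
          simp [pvStepA, hc, hi],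
          pvFoldA_blocked _ _ _ _ (Or.inr (by simp)), hfs, htf]
        simp [hi]
      · rw [List.foldl_cons, show pvStepA (none, [], t) s = (none, [s], t) from by
          simp [pvStepA, hc, hi],
          pvFoldA_blocked _ _ _ _ (Or.inl (by simp)), hfs, htf]
        simp [hi]

-- B's backward tone scan finds the first tone symbol of its argument
lemma pv_toneRev_eq (l : List Char) :
    pvToneRevB l = match l.find? (fun c => PySem.Chars.isIn [c] pvTONES) with
      | some u => PySem.Chars.find pvTONES [u] + 1
      | none => 1 := by
  induction l with
  | nil => rfl
  | cons s ss ih =>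
    by_cases h : PySem.Chars.isIn [s] pvTONES = true
    · have hnn : (0 : Int) ≤ PySem.Chars.find pvTONES [s] := by
        rw [PySem.Chars.find_nonneg_iff, ← PySem.Chars.isIn_iff_infix]; exact h
      rw [show List.find? (fun c => PySem.Chars.isIn [c] pvTONES) (s :: ss) = some s from
        List.find?_cons_of_pos h]
      simp [pvToneRevB, hnn]
    · have hneg : ¬ (0 : Int) ≤ PySem.Chars.find pvTONES [s] := by
        rw [PySem.Chars.find_nonneg_iff, ← PySem.Chars.isIn_iff_infix]
        simpa using h
      rw [show List.find? (fun c => PySem.Chars.isIn [c] pvTONES) (s :: ss)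
          = List.find? (fun c => PySem.Chars.isIn [c] pvTONES) ss from
        List.find?_cons_of_neg (by simpa using h)]
      simp [pvToneRevB, hneg, ih]

-- "".join over 1-char strings
lemma pv_join1 (l : List Char) :
    PySem.Str.join "" (l.map (fun c => String.ofList [c])) = String.ofList l := by
  rw [← String.ofList_toList (s := PySem.Str.join "" (l.map (fun c => String.ofList [c]))),
    PySem.Str.toList_join]
  congr 1
  rw [List.map_map]
  have : (String.toList ∘ fun c => String.ofList [c]) = fun c => [c] := by
    funext c; simp [String.toList_ofList]
  rw [show ("" : String).toList = [] from rfl, this, PySem.Chars.join_nil_singletons]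

-- the cores agree on any list of 1-char symbols
lemma pv_core_eq (cs : List Char) :
    pvCoreA (cs.map (fun c => String.ofList [c])) =
      (let tone := pvToneRevB cs.reverse
       let rest := cs.filter (fun s => !(PySem.Chars.isIn [s] pvTONES))
       match rest with
       | [] => ((none : Option String), (none : Option String), some tone)
       | r :: rs =>
         if PySem.Chars.isIn [r] (PySem.List.slice pvZHUYIN none (some 21)) then
           (some (String.ofList [r]), if rs == [] then none else some (String.ofList rs), some tone)
         else (none, some (String.ofList (r :: rs)), some tone)) := by
  have hfm : (cs.map (fun c => String.ofList [c])).filter (fun s => !pvTONE_MAP.contains s)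
      = (cs.filter (fun c => !(PySem.Chars.isIn [c] pvTONES))).map (fun c => String.ofList [c]) := by
    rw [List.filter_map]
    congr 1
    apply List.filter_congr
    intro c _
    simp [Function.comp, pv_tone_mem]
  have htone : pvToneFold 1 (cs.map (fun c => String.ofList [c])) = pvToneRevB cs.reverse := by
    rw [pvToneFold_eq_getLast, pv_toneRev_eq]
    have h1 : (cs.map (fun c => String.ofList [c])).filter (fun s => pvTONE_MAP.contains s)
        = (cs.filter (fun c => PySem.Chars.isIn [c] pvTONES)).map (fun c => String.ofList [c]) := by
      rw [List.filter_map]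
      congr 1
      apply List.filter_congr
      intro c _
      simp [Function.comp, pv_tone_mem]
    have h2 : cs.reverse.find? (fun c => PySem.Chars.isIn [c] pvTONES)
        = (cs.filter (fun c => PySem.Chars.isIn [c] pvTONES)).getLast? := by
      rw [List.head?_filter.symm, List.filter_reverse, List.head?_reverse]
    rw [h1, h2, List.getLast?_map]
    cases hlast : (cs.filter (fun c => PySem.Chars.isIn [c] pvTONES)).getLast? with
    | none => rfl
    | some u =>
      have hu : u ∈ pvTONES := by
        obtain ⟨ys, hys⟩ := List.getLast?_eq_some_iff.mp hlast
        have hmem : u ∈ cs.filter (fun c => PySem.Chars.isIn [c] pvTONES) := by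
          rw [hys]; simp
        have := List.of_mem_filter hmem
        rw [pv_isIn1] at this
        simpa using this
      simp only [Option.map_some]
      exact pv_tone_val u hu
  unfold pvCoreA
  rw [pvFoldA_main, hfm, htone]
  cases hr : cs.filter (fun s => !(PySem.Chars.isIn [s] pvTONES)) with
  | nil => simp
  | cons r rs =>
    rw [List.map_cons]
    simp only []
    rw [pv_initial_mem r]
    by_cases hi : PySem.Chars.isIn [r] (PySem.List.slice pvZHUYIN none (some 21)) = true
    · simp only [hi, if_true]
      cases rs with
      | nil => simp
      | cons r2 rs2 =>
        have hj := pv_join1 (r2 :: rs2)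
        rw [List.map_cons] at hj
        simp [hj]
    · simp only [hi]
      have hj := pv_join1 (r :: rs)
      rw [List.map_cons] at hj
      simp [hj]

-- A's check-then-core = B's match, over any key list
lemma pv_assemble (keys : List String) :
    (if (keys.map (fun k => pvKEY_TO_ZHUYIN.get? k)).contains none then
        ((none : Option String), (none : Option String), (none : Option Int))
      else pvCoreA (keys.map (fun k => pvKEY_TO_ZHUYIN.get? k)).reduceOption) =
    (match pvMapKeysB keys with
     | none => ((none : Option String), (none : Option String), (none : Option Int))
     | some syms =>
       let tone := pvToneRevB syms.reverse
       let rest := syms.filter (fun s => !(PySem.Chars.isIn [s] pvTONES))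
       match rest with
       | [] => (none, none, some tone)
       | r :: rs =>
         if PySem.Chars.isIn [r] (PySem.List.slice pvZHUYIN none (some 21)) then
           (some (String.ofList [r]), if rs == [] then none else some (String.ofList rs), some tone)
         else (none, some (String.ofList (r :: rs)), some tone)) := by
  cases hm : pvMapKeysB keys with
  | none =>
    rw [if_pos ((pv_map_none keys).mpr hm)]
  | some cs =>
    rw [if_neg (by
      intro hcon
      exact (by simp [hm] : pvMapKeysB keys ≠ none) ((pv_map_none keys).mp hcon))]
    rw [pv_map_some keys cs hm, pv_core_eq]

-- ===== VERDICT =====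
theorem parse_zhuyin_spec : Claim_equal_parse_zhuyin := by
  intro input_code _
  unfold Spec_parse_zhuyin parse_zhuyin parse_zhuyin_alt pvZhuyinKeys
  rw [pv_tail_eq]
  exact pv_assemble _
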